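-- pv_equiv track=rewrite | github.com/imthomp/seating-chart-generator | seating_algorithm.py | calculate_dimensions_with_user_input
-- ===== SOURCE A (Python) =====
-- import math
-- from typing import List, Optional
--
-- def calculate_chart_dimensions(num_singers: int, num_parts: int, layout: str) -> tuple[int, int]:
--     """
--     Calculate reasonable row and seat counts for a given number of singers.
--
--     Args:
--         num_singers: Total number of singers
--         num_parts: Number of voice parts
--         layout: "side-by-side" or "stacked"
--
--     Returns:
--         Tuple of (rows, seats_per_row)
--     """
--     # Aim for roughly 10-15 singers per row
--     target_per_row = 12
--     rows = max(2, math.ceil(num_singers / target_per_row))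
--
--     if layout == "stacked":
--         # Make rows divisible by num_parts for clean splits
--         while rows % num_parts != 0:
--             rows += 1
--
--     seats_per_row = math.ceil(num_singers / rows)
--
--     if layout == "side-by-side":
--         # Make seats divisible by num_parts for clean splits
--         while seats_per_row % num_parts != 0:
--             seats_per_row += 1
--
--     return rows, seats_per_row
--
-- def calculate_dimensions_with_user_input(
--     num_singers: int,
--     num_parts: int,
--     layout: str,
--     user_rows: Optional[int] = None,
--     user_max_per_row: Optional[int] = None
-- ) -> tuple[int, int]:
--     """
--     Calculate chart dimensions, respecting user input where provided.
--
--     Args: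
--         num_singers: Total number of singers
--         num_parts: Number of voice parts
--         layout: "side-by-side" or "stacked"
--         user_rows: User-specified number of rows (optional)
--         user_max_per_row: User-specified max per row (optional, blank = auto)
--
--     Returns:
--         Tuple of (rows, seats_per_row)
--     """
--     if user_rows and user_max_per_row:
--         # User specified both - use as-is
--         return user_rows, user_max_per_row
--
--     if user_rows and not user_max_per_row:
--         # User specified rows only - calculate seats per row
--         seats_per_row = math.ceil(num_singers / user_rows)
--         if layout == "side-by-side":
--             while seats_per_row % num_parts != 0:
--                 seats_per_row += 1
--         return user_rows, seats_per_row
--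
--     if user_max_per_row and not user_rows:
--         # User specified max per row only - calculate rows
--         rows = math.ceil(num_singers / user_max_per_row)
--         if layout == "stacked":
--             while rows % num_parts != 0:
--                 rows += 1
--         return rows, user_max_per_row
--
--     # Neither specified - auto calculate
--     return calculate_chart_dimensions(num_singers, num_parts, layout)
-- ===== SOURCE B (Python) =====
-- # B: same branch dispatch, but pure-integer ceiling division (no float round-trip)
-- # and a closed-form round-up to the next multiple instead of the increment loops;
-- # the auto branch is inlined rather than delegated to a helper.
--
-- def _ceil_div(a, b):
--     return -(-a // b)
--
-- def _round_up(x, n):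
--     # smallest y >= x with y % n == 0 (raises ZeroDivisionError when n == 0, like the loop)
--     return x + (-x) % abs(n)
--
-- def calculate_dimensions_with_user_input(num_singers, num_parts, layout, user_rows=None, user_max_per_row=None):
--     if user_rows and user_max_per_row:
--         return user_rows, user_max_per_row
--     if user_rows:
--         s = _ceil_div(num_singers, user_rows)
--         return user_rows, (_round_up(s, num_parts) if layout == "side-by-side" else s)
--     if user_max_per_row:
--         r = _ceil_div(num_singers, user_max_per_row)
--         return (_round_up(r, num_parts) if layout == "stacked" else r), user_max_per_row
--     r = max(2, _ceil_div(num_singers, 12))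
--     if layout == "stacked":
--         r = _round_up(r, num_parts)
--     s = _ceil_div(num_singers, r)
--     if layout == "side-by-side":
--         s = _round_up(s, num_parts)
--     return r, s
-- ===== Notes on version B (the rewrite author's own statement) =====
-- stated objective: idiomatic
-- what changed: Each 'while x % num_parts != 0: x += 1' increment loop is replaced by a closed-form round-up to the next multiple (x + (-x) % abs(num_parts)), math.ceil of a float quotient is replaced by pure-integer ceiling division -(-a//b), and the auto-calculate helper is inlined.
import Mathlib
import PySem

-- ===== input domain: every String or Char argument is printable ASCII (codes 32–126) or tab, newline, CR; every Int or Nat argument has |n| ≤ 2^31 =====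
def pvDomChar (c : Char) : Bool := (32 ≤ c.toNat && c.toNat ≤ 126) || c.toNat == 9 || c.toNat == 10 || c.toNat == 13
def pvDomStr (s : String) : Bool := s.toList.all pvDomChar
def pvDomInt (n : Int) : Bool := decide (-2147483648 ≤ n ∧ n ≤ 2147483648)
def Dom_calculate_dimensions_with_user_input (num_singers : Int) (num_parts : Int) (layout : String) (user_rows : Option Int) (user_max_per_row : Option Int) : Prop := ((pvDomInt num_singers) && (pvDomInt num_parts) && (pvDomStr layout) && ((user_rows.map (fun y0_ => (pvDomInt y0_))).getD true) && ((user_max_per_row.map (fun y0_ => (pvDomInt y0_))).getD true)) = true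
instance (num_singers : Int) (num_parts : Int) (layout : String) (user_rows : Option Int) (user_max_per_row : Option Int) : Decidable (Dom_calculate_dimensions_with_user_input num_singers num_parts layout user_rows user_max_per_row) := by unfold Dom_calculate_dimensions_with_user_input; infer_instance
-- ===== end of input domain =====

-- ===== PORT A =====
-- One honest line: B replaces the increment round-up loops by a closed-form next-multiple
-- formula and float math.ceil by integer ceiling division; idiomatic, same values on Pre_.

-- Python truthiness of an Optional[int]: None and 0 are falsy.
def pyTruthy (o : Option Int) : Bool :=
  match o with
  | none => false
  | some v => v != 0

-- Exact port of math.ceil(a / b) for Dom-bounded ints: for |a|, |b| <= 2^31 the float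
-- quotient's rounding error is below the distance to the next integer, so
-- math.ceil(a / b) equals the exact ceiling -((-a) // b).
def pvCeilA (a b : Int) : Int := -(PySem.Int.floordiv (-a) b)

-- arithmetic step used both for the loop's termination and for the equivalence proof
theorem pvModStep (x N : Int) (hN : 0 < N) (hnd : ¬ N ∣ x) :
    (-(x+1)) % N = (-x) % N - 1 ∧ 0 < (-x) % N := by
  have h2 : 0 ≤ (-x) % N := Int.emod_nonneg _ (ne_of_gt hN)
  have h3 : (-x) % N < N := Int.emod_lt_of_pos _ hN
  have h4 : (-x) % N ≠ 0 := by
    intro h0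
    exact hnd (Int.dvd_neg.mp (Int.dvd_of_emod_eq_zero h0))
  have hN1 : 1 < N := by
    by_cases h1 : N = 1
    · exact absurd (h1 ▸ one_dvd x) hnd
    · omega
  constructor
  · have he : -(x+1) = (-x) - 1 := by ring
    rw [he, Int.sub_emod, Int.emod_eq_of_lt (by omega) hN1,
        Int.emod_eq_of_lt (by omega) (by omega)]
  · omega

-- literal port of 'while x % num_parts != 0: x += 1'; the n = 0 branch is a totality
-- guard only (Python raises ZeroDivisionError there; excluded by Pre_)
def climbLoop (x n : Int) : Int :=
  if h0 : n = 0 then x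
  else if PySem.Int.mod x n = 0 then x
  else climbLoop (x+1) n
termination_by (PySem.Int.mod (-x) ((n.natAbs : Int))).toNat
decreasing_by
  rename_i hmod
  have hN : 0 < ((n.natAbs : Int)) := by exact_mod_cast Int.natAbs_pos.mpr h0
  have hnd : ¬ ((n.natAbs : Int)) ∣ x := by
    intro hd
    exact hmod ((PySem.Int.mod_eq_zero_iff_dvd x n).mpr (Int.natAbs_dvd.mp hd))
  obtain ⟨hstep, hpos⟩ := pvModStep x _ hN hnd
  rw [PySem.Int.mod_eq_emod_of_pos hN, PySem.Int.mod_eq_emod_of_pos hN, hstep]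
  omega

-- helper of A, ported as a helper
def calculate_chart_dimensions (num_singers : Int) (num_parts : Int) (layout : String) : Int × Int :=
  let rows := max 2 (pvCeilA num_singers 12)
  let rows := if layout = "stacked" then climbLoop rows num_parts else rows
  let seats_per_row := pvCeilA num_singers rows
  let seats_per_row := if layout = "side-by-side" then climbLoop seats_per_row num_parts else seats_per_row
  (rows, seats_per_row)

def calculate_dimensions_with_user_input (num_singers : Int) (num_parts : Int) (layout : String) (user_rows : Option Int) (user_max_per_row : Option Int) : Int × Int :=
  if pyTruthy user_rows && pyTruthy user_max_per_row then
    (user_rows.getD 0, user_max_per_row.getD 0)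
  else if pyTruthy user_rows && !pyTruthy user_max_per_row then
    let seats_per_row := pvCeilA num_singers (user_rows.getD 0)
    let seats_per_row := if layout = "side-by-side" then climbLoop seats_per_row num_parts else seats_per_row
    (user_rows.getD 0, seats_per_row)
  else if pyTruthy user_max_per_row && !pyTruthy user_rows then
    let rows := pvCeilA num_singers (user_max_per_row.getD 0)
    let rows := if layout = "stacked" then climbLoop rows num_parts else rows
    (rows, user_max_per_row.getD 0)
  else
    calculate_chart_dimensions num_singers num_parts layout

-- ===== PORT B =====
-- _ceil_div(a, b) = -(-a // b)
def pvCeilDiv (a b : Int) : Int := -(PySem.Int.floordiv (-a) b)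

-- _round_up(x, n) = x + (-x) % abs(n)
def pvRoundUp (x n : Int) : Int := x + PySem.Int.mod (-x) ((n.natAbs : Int))

def calculate_dimensions_with_user_input_alt (num_singers : Int) (num_parts : Int) (layout : String) (user_rows : Option Int) (user_max_per_row : Option Int) : Int × Int :=
  if pyTruthy user_rows && pyTruthy user_max_per_row then
    (user_rows.getD 0, user_max_per_row.getD 0)
  else if pyTruthy user_rows then
    let s := pvCeilDiv num_singers (user_rows.getD 0)
    (user_rows.getD 0, if layout = "side-by-side" then pvRoundUp s num_parts else s)
  else if pyTruthy user_max_per_row then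
    let r := pvCeilDiv num_singers (user_max_per_row.getD 0)
    ((if layout = "stacked" then pvRoundUp r num_parts else r), user_max_per_row.getD 0)
  else
    let r := max 2 (pvCeilDiv num_singers 12)
    let r := if layout = "stacked" then pvRoundUp r num_parts else r
    let s := pvCeilDiv num_singers r
    (r, if layout = "side-by-side" then pvRoundUp s num_parts else s)

-- ===== PRECONDITION & SPEC =====
-- Pre_ excludes exactly the ZeroDivisionError inputs: num_parts = 0 while a rounding loop
-- is reached (Python A raises there; it returns on every other input).
def Pre_calculate_dimensions_with_user_input (num_singers : Int) (num_parts : Int) (layout : String) (user_rows : Option Int) (user_max_per_row : Option Int) : Prop :=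
  if pyTruthy user_rows && pyTruthy user_max_per_row then True
  else if pyTruthy user_rows then (layout = "side-by-side" → num_parts ≠ 0)
  else if pyTruthy user_max_per_row then (layout = "stacked" → num_parts ≠ 0)
  else ((layout = "stacked" ∨ layout = "side-by-side") → num_parts ≠ 0)
instance (num_singers : Int) (num_parts : Int) (layout : String) (user_rows : Option Int) (user_max_per_row : Option Int) : Decidable (Pre_calculate_dimensions_with_user_input num_singers num_parts layout user_rows user_max_per_row) := by unfold Pre_calculate_dimensions_with_user_input; infer_instance

def pvWitness_calculate_dimensions_with_user_input : Int × Int × String × Option Int × Option Int := (25, 4, "stacked", none, none)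

def Spec_calculate_dimensions_with_user_input (num_singers : Int) (num_parts : Int) (layout : String) (user_rows : Option Int) (user_max_per_row : Option Int) (out : Int × Int) : Prop := out = calculate_dimensions_with_user_input_alt num_singers num_parts layout user_rows user_max_per_row
instance (num_singers : Int) (num_parts : Int) (layout : String) (user_rows : Option Int) (user_max_per_row : Option Int) (out : Int × Int) : Decidable (Spec_calculate_dimensions_with_user_input num_singers num_parts layout user_rows user_max_per_row out) := by unfold Spec_calculate_dimensions_with_user_input; infer_instance

-- ===== CLAIM (what is proved, stated in full; the proofs are below) =====
def Claim_equal_calculate_dimensions_with_user_input : Prop := ∀ (num_singers : Int) (num_parts : Int) (layout : String) (user_rows : Option Int) (user_max_per_row : Option Int), Dom_calculate_dimensions_with_user_input num_singers num_parts layout user_rows user_max_per_row → Pre_calculate_dimensions_with_user_input num_singers num_parts layout user_rows user_max_per_row → Spec_calculate_dimensions_with_user_input num_singers num_parts layout user_rows user_max_per_row (calculate_dimensions_with_user_input num_singers num_parts layout user_rows user_max_per_row)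

-- ===== LEMMAS AND PROOFS =====

theorem pvWitness_ok : Dom_calculate_dimensions_with_user_input 25 4 "stacked" none none ∧ Pre_calculate_dimensions_with_user_input 25 4 "stacked" none none := by decide

-- the loop equals the closed-form round-up whenever Python terminates (n ≠ 0)
theorem climbLoop_eq_roundUp (x n : Int) (hn : n ≠ 0) : climbLoop x n = pvRoundUp x n := by
  fun_induction climbLoop x n with
  | case1 x h0 => exact absurd h0 hn
  | case2 x h0 hmod =>
    have hN : 0 < ((n.natAbs : Int)) := by exact_mod_cast Int.natAbs_pos.mpr h0
    have hd : ((n.natAbs : Int)) ∣ (-x) :=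
      Int.dvd_neg.mpr (Int.natAbs_dvd.mpr ((PySem.Int.mod_eq_zero_iff_dvd x n).mp hmod))
    simp [h0, pvRoundUp]
    exact (PySem.Int.mod_eq_zero_iff_dvd x n).mp hmod
  | case3 x h0 hmod ih =>
    have hN : 0 < ((n.natAbs : Int)) := by exact_mod_cast Int.natAbs_pos.mpr h0
    have hnd : ¬ ((n.natAbs : Int)) ∣ x := by
      intro hd
      exact hmod ((PySem.Int.mod_eq_zero_iff_dvd x n).mpr (Int.natAbs_dvd.mp hd))
    obtain ⟨hstep, hpos⟩ := pvModStep x _ hN hnd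
    rw [ih, pvRoundUp, pvRoundUp, PySem.Int.mod_eq_emod_of_pos hN,
      PySem.Int.mod_eq_emod_of_pos hN, hstep]
    ring

-- ===== VERDICT (by name: the statement is the Claim_ definition above) =====
theorem calculate_dimensions_with_user_input_spec : Claim_equal_calculate_dimensions_with_user_input := by
  intro ns np lay ur um hdom hpre
  unfold Spec_calculate_dimensions_with_user_input
  unfold Pre_calculate_dimensions_with_user_input at hpre
  unfold calculate_dimensions_with_user_input calculate_dimensions_with_user_input_alt
    calculate_chart_dimensions
  cases hur : pyTruthy ur <;> cases hum : pyTruthy um <;>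
    simp only [hur, hum, Bool.and_self, Bool.and_true, Bool.and_false, Bool.true_and,
      Bool.false_and, Bool.not_true, Bool.not_false, if_true, if_false, ite_true, ite_false,
      Bool.false_eq_true, Bool.true_eq_false] at hpre ⊢
  · -- neither truthy: auto branch
    by_cases hs : lay = "stacked"
    · by_cases hb : lay = "side-by-side"
      · rw [hs] at hb; exact absurd hb (by decide)
      · have hnp : np ≠ 0 := hpre (Or.inl hs)
        simp [hs, hb, pvCeilA, pvCeilDiv, climbLoop_eq_roundUp _ _ hnp]
    · by_cases hb : lay = "side-by-side"
      · have hnp : np ≠ 0 := hpre (Or.inr hb)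
        simp [hs, hb, pvCeilA, pvCeilDiv, climbLoop_eq_roundUp _ _ hnp]
      · simp [hs, hb, pvCeilA, pvCeilDiv]
  · -- only user_max_per_row is truthy
    by_cases hs : lay = "stacked"
    · simp [hs, pvCeilA, pvCeilDiv, climbLoop_eq_roundUp _ _ (hpre hs)]
    · simp [hs, pvCeilA, pvCeilDiv]
  · -- only user_rows is truthy
    by_cases hb : lay = "side-by-side"
    · simp [hb, pvCeilA, pvCeilDiv, climbLoop_eq_roundUp _ _ (hpre hb)]
    · simp [hb, pvCeilA, pvCeilDiv]
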